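-- pv_equiv track=rewrite | github.com/lukeyigechen/optimality-theory-mark | src/ot_constraint.py | cons_align_ft_r
-- ===== SOURCE A (Python) =====
-- def cons_align_ft_r(list_syl_stress):
--     num_violate = 0
--     for syl_info in reversed(list_syl_stress):
--         if syl_info[-1]:
--             break
--         else:
--             num_violate += len(syl_info[0])
--     return num_violate
-- ===== SOURCE B (Python) =====
-- def cons_align_ft_r(list_syl_stress):
--     last = -1
--     for i, syl_info in enumerate(list_syl_stress):
--         if syl_info[-1]:
--             last = i
--     total = 0
--     for syl_info in list_syl_stress[last + 1:]:
--         total += len(syl_info[0])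
--     return total
-- ===== Notes on version B (the rewrite author's own statement) =====
-- stated objective: alternative
-- what changed: Replaced the reverse early-exit accumulation with a two-pass forward shape: one pass records the index of the last stressed syllable, a second pass sums the lengths of the syllables strictly after it.
import Mathlib
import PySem

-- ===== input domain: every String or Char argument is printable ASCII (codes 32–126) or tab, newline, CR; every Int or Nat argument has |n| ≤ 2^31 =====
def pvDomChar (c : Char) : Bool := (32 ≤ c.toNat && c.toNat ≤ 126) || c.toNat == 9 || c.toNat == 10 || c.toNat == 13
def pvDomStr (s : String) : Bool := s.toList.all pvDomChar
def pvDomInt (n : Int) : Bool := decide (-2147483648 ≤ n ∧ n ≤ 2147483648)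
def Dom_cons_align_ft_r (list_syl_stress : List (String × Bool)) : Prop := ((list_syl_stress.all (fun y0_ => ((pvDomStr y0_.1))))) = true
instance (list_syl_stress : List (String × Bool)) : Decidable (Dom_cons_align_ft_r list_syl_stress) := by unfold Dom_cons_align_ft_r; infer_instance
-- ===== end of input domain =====

-- B replaces A's reverse early-exit accumulation by a forward "find last stressed index,
-- then sum the suffix after it" two-pass shape (alternative decomposition, same O(n) cost).


-- ===== PORT A =====
-- the reversed(...) loop with its break: structural recursion over list_syl_stress.reverse
def consAlignLoopA : List (String × Bool) → Int
  | [] => 0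
  | syl_info :: rest =>
      if syl_info.2 then 0
      else PySem.Str.len syl_info.1 + consAlignLoopA rest

def cons_align_ft_r (list_syl_stress : List (String × Bool)) : Int :=
  consAlignLoopA list_syl_stress.reverse

-- ===== PORT B =====
def cons_align_ft_r_alt (list_syl_stress : List (String × Bool)) : Int :=
  let last : Int :=
    (PySem.List.enumerate list_syl_stress).foldl
      (fun acc p => if p.2.2 then p.1 else acc) (-1)
  (PySem.List.slice list_syl_stress (some (last + 1)) none).foldl
    (fun total syl_info => total + PySem.Str.len syl_info.1) 0

-- ===== PRECONDITION & SPEC =====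
def Spec_cons_align_ft_r (list_syl_stress : List (String × Bool)) (out : Int) : Prop := out = cons_align_ft_r_alt list_syl_stress
instance (list_syl_stress : List (String × Bool)) (out : Int) : Decidable (Spec_cons_align_ft_r list_syl_stress out) := by unfold Spec_cons_align_ft_r; infer_instance

-- ===== CLAIM (what is proved, stated in full; the proofs are below) =====
def Claim_equal_cons_align_ft_r : Prop := ∀ (list_syl_stress : List (String × Bool)), Dom_cons_align_ft_r list_syl_stress → Spec_cons_align_ft_r list_syl_stress (cons_align_ft_r list_syl_stress)

-- ===== LEMMAS AND PROOFS =====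

-- B's first pass, named for the proofs
def pvLastB (l : List (String × Bool)) : Int :=
  (PySem.List.enumerate l).foldl (fun acc p => if p.2.2 then p.1 else acc) (-1)

theorem pvLastB_eq (l : List (String × Bool)) :
    cons_align_ft_r_alt l =
      (PySem.List.slice l (some (pvLastB l + 1)) none).foldl
        (fun total syl_info => total + PySem.Str.len syl_info.1) 0 := rfl

theorem pvLastB_bounds (l : List (String × Bool)) :
    -1 ≤ pvLastB l ∧ pvLastB l < l.length := by
  unfold pvLastB
  induction l using List.reverseRecOn with
  | nil => simp [PySem.List.enumerate]
  | append_singleton xs x ih =>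
      rw [PySem.List.enumerate_append, List.foldl_append]
      simp only [PySem.List.enumerate, List.foldl_cons, List.foldl_nil, List.length_append]
      rcases ih with ⟨h1, h2⟩
      by_cases hx : x.2 <;> (simp [hx]; try omega)

theorem pvLastB_append (xs : List (String × Bool)) (x : String × Bool) :
    pvLastB (xs ++ [x]) = if x.2 then (xs.length : Int) else pvLastB xs := by
  unfold pvLastB
  rw [PySem.List.enumerate_append, List.foldl_append]
  simp [PySem.List.enumerate]

theorem pv_main (l : List (String × Bool)) :
    cons_align_ft_r l = cons_align_ft_r_alt l := by
  induction l using List.reverseRecOn with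
  | nil => rfl
  | append_singleton xs x ih =>
      have hb := pvLastB_bounds xs
      rw [cons_align_ft_r, List.reverse_append, List.reverse_singleton,
        List.singleton_append, consAlignLoopA]
      rw [pvLastB_eq, pvLastB_append]
      by_cases hx : x.2
      · simp only [hx, if_true]
        rw [PySem.List.slice_from _ (by omega : (0:Int) ≤ (xs.length : Int) + 1)]
        have : ((xs.length : Int) + 1).toNat = xs.length + 1 := by omega
        rw [this]
        simp
      · simp only [hx, Bool.false_eq_true, if_false]
        rw [cons_align_ft_r, pvLastB_eq] at ih
        rw [PySem.List.slice_from _ (by omega : (0:Int) ≤ pvLastB xs + 1)] at ih ⊢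
        have hle : (pvLastB xs + 1).toNat ≤ xs.length := by omega
        rw [List.drop_append_of_le_length hle, List.foldl_append]
        simp only [List.foldl_cons, List.foldl_nil]
        rw [ih]
        ring

-- ===== VERDICT (by name: the statement is the Claim_ definition above) =====
theorem cons_align_ft_r_spec : Claim_equal_cons_align_ft_r := by
  intro l _
  exact pv_main l
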